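-- pv_equiv track=rewrite | github.com/iatagun/tr-morph-ngram | taggers/crf.py | _extract_dim_labels
-- ===== SOURCE A (Python) =====
-- from typing import List, Dict, Tuple, Optional
--
-- NONE_LABEL = "NONE"
--
-- def feats_to_dict(feats_str: str) -> Dict[str, str]:
--     """'Aspect=Prog|Mood=Ind|...' → {'Aspect': 'Prog', 'Mood': 'Ind', ...}"""
--     if feats_str in ("_", "NONE", ""):
--         return {}
--     result = {}
--     for kv in feats_str.split("|"):
--         if "=" in kv:
--             k, v = kv.split("=", 1)
--             result[k] = v
--     return result
--
-- def _extract_dim_labels(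
--
--     sentences: List[Tuple[List[str], List[str]]],
--     dim: str,
-- ) -> List[List[str]]:
--     result = []
--     for _, feats_list in sentences:
--         labels = []
--         for feats_str in feats_list:
--             d = feats_to_dict(feats_str)
--             labels.append(d.get(dim, NONE_LABEL))
--         result.append(labels)
--     return result
-- ===== SOURCE B (Python) =====
-- NONE_LABEL = "NONE"
--
-- def _extract_dim_labels(sentences, dim):
--     def label(feats_str):
--         # scan segments back-to-front and return the first match = Python-dict last-wins
--         for seg in reversed(feats_str.split("|")):
--             if "=" in seg:
--                 k, v = seg.split("=", 1)
--                 if k == dim: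
--                     return v
--         return NONE_LABEL
--     return [[label(f) for f in feats_list] for _, feats_list in sentences]
-- ===== Notes on version B (the rewrite author's own statement) =====
-- stated objective: simpler
-- what changed: B drops feats_to_dict and its per-token dictionary entirely: it scans each token's '|' segments back-to-front and returns the FIRST segment keyed dim (early exit), which equals A's forward dict build whose lookup yields the last-wins value; output is built with nested comprehensions instead of accumulator appends.
import Mathlib
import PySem

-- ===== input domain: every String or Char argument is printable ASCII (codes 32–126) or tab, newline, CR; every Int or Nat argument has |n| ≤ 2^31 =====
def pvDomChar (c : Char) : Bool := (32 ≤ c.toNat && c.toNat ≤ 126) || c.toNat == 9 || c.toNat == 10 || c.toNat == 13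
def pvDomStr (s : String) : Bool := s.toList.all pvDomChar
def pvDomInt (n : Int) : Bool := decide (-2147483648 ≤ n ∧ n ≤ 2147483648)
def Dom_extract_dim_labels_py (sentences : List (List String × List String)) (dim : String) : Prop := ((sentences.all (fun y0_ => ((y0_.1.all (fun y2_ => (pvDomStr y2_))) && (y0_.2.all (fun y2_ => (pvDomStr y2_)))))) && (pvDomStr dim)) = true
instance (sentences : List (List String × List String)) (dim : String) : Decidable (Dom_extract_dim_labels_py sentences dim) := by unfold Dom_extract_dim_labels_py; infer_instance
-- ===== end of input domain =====

-- B drops A's per-token dictionary (and its '_'/'NONE'/'' special case): it scans the '|'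
-- segments back-to-front and returns the first match (= A's last-wins) (objective: simpler).

-- ===== PORT A =====
def feats_to_dict_py (feats_str : String) : PySem.Dict String String :=
  if feats_str = "_" ∨ feats_str = "NONE" ∨ feats_str = "" then PySem.Dict.empty
  else
    ((PySem.Str.split? feats_str "|").getD []).foldl (fun result kv =>
      if PySem.Str.isIn "=" kv then
        match PySem.Str.splitMax? kv "=" 1 with
        | some (k :: v :: _) => result.insert k v
        | _ => result
      else result) PySem.Dict.empty

def extract_dim_labels_py (sentences : List (List String × List String)) (dim : String) : List (List String) :=
  sentences.foldl (fun result p =>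
    result ++ [p.2.foldl (fun labels feats_str =>
      labels ++ [(feats_to_dict_py feats_str).getD dim "NONE"]) []]) []

-- ===== PORT B =====
-- B's reversed-segments loop with early return: first segment (from the end) keyed dim
def dimFindRev (dim : String) : List String → String
  | [] => "NONE"
  | seg :: rest =>
    if PySem.Str.isIn "=" seg then
      match PySem.Str.splitMax? seg "=" 1 with
      | some (k :: v :: _) => if k = dim then v else dimFindRev dim rest
      | _ => dimFindRev dim rest
    else dimFindRev dim rest

def extract_dim_labels_py_alt (sentences : List (List String × List String)) (dim : String) : List (List String) :=
  sentences.map (fun p =>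
    p.2.map (fun feats_str =>
      dimFindRev dim ((PySem.Str.split? feats_str "|").getD []).reverse))

-- ===== PRECONDITION & SPEC =====
def Spec_extract_dim_labels_py (sentences : List (List String × List String)) (dim : String) (out : List (List String)) : Prop := out = extract_dim_labels_py_alt sentences dim
instance (sentences : List (List String × List String)) (dim : String) (out : List (List String)) : Decidable (Spec_extract_dim_labels_py sentences dim out) := by unfold Spec_extract_dim_labels_py; infer_instance

-- ===== CLAIM (what is proved, stated in full; the proofs are below) =====
def Claim_equal_extract_dim_labels_py : Prop := ∀ (sentences : List (List String × List String)) (dim : String), Dom_extract_dim_labels_py sentences dim → Spec_extract_dim_labels_py sentences dim (extract_dim_labels_py sentences dim)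

-- ===== LEMMAS AND PROOFS =====

-- forward last-wins step over one segment (proof-only abstraction of A's dict update effect)
def dimLabelStep (dim : String) (label : String) (seg : String) : String :=
  if PySem.Str.isIn "=" seg then
    match PySem.Str.splitMax? seg "=" 1 with
    | some (k :: v :: _) => if k = dim then v else label
    | _ => label
  else label

-- dimFindRev with an arbitrary fallback (proof-only generalisation)
def dimFindRevD (dim : String) (a : String) : List String → String
  | [] => a
  | seg :: rest =>
    if PySem.Str.isIn "=" seg then
      match PySem.Str.splitMax? seg "=" 1 with
      | some (k :: v :: _) => if k = dim then v else dimFindRevD dim a rest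
      | _ => dimFindRevD dim a rest
    else dimFindRevD dim a rest

theorem dimFindRevD_none (dim : String) (l : List String) :
    dimFindRevD dim "NONE" l = dimFindRev dim l := by
  induction l with
  | nil => rfl
  | cons s rest ih =>
    simp only [dimFindRevD, dimFindRev, ih]

theorem dimFindRevD_append_singleton (dim a s : String) (l : List String) :
    dimFindRevD dim a (l ++ [s]) = dimFindRevD dim (dimLabelStep dim a s) l := by
  induction l with
  | nil =>
    simp only [List.nil_append]
    show dimFindRevD dim a [s] = dimLabelStep dim a s
    unfold dimFindRevD dimLabelStep
    split_ifs with h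
    · cases hs : PySem.Str.splitMax? s "=" 1 with
      | none => rfl
      | some parts => match parts with
        | [] => rfl
        | [k] => rfl
        | k :: v :: r => rfl
    · rfl
  | cons t l ih =>
    simp only [List.cons_append, dimFindRevD, ih]

-- the forward last-wins fold equals the reverse first-match scan
theorem foldl_eq_findRev (dim : String) (segs : List String) (a : String) :
    segs.foldl (dimLabelStep dim) a = dimFindRevD dim a segs.reverse := by
  induction segs generalizing a with
  | nil => rfl
  | cons s rest ih =>
    simp only [List.foldl, List.reverse_cons, dimFindRevD_append_singleton, ih]

-- appending one element at a time into an accumulator is mapping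
theorem foldl_push_eq_map {α β : Type} (f : α → β) (l : List α) (acc : List β) :
    l.foldl (fun r x => r ++ [f x]) acc = acc ++ l.map f := by
  induction l generalizing acc with
  | nil => simp
  | cons x xs ih => simp [List.foldl, ih]

-- building the dict over segments and then reading dim = folding the last-wins label
theorem dict_fold_getD (dim : String) (segs : List String) (d : PySem.Dict String String) :
    (segs.foldl (fun result kv =>
      if PySem.Str.isIn "=" kv then
        match PySem.Str.splitMax? kv "=" 1 with
        | some (k :: v :: _) => result.insert k v
        | _ => result
      else result) d).getD dim "NONE"
    = segs.foldl (dimLabelStep dim) (d.getD dim "NONE") := by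
  induction segs generalizing d with
  | nil => rfl
  | cons s rest ih =>
    simp only [List.foldl]
    rw [ih]
    congr 1
    unfold dimLabelStep
    split_ifs with h
    · cases hs : PySem.Str.splitMax? s "=" 1 with
      | none => simp
      | some parts =>
        match parts with
        | [] => simp
        | [k] => simp
        | k :: v :: rest' =>
          simp only [PySem.Dict.getD_insert]
          rcases eq_or_ne k dim with rfl | hk
          · simp
          · rw [if_neg (Ne.symm hk), if_neg hk]
    · rfl

-- per-token label agreement
theorem token_label (dim : String) (s : String) :
    (feats_to_dict_py s).getD dim "NONE"
      = dimFindRev dim ((PySem.Str.split? s "|").getD []).reverse := by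
  rw [← dimFindRevD_none]
  unfold feats_to_dict_py
  split_ifs with h
  · rcases h with h | h | h <;> subst h <;> rfl
  · rw [dict_fold_getD, foldl_eq_findRev]
    rfl

-- ===== VERDICT (by name: the statement is the Claim_ definition above) =====
theorem extract_dim_labels_py_spec : Claim_equal_extract_dim_labels_py := by
  intro sentences dim _
  unfold Spec_extract_dim_labels_py extract_dim_labels_py extract_dim_labels_py_alt
  rw [foldl_push_eq_map]
  simp only [List.nil_append]
  refine List.map_congr_left fun p _ => ?_
  rw [foldl_push_eq_map]
  simp only [List.nil_append]
  exact List.map_congr_left fun s _ => token_label dim s
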